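-- pv_equiv track=rewrite | github.com/Diego77Blaze/Algoritmia | Lab4/Ejer7.py | crearTablaSecuencias
-- ===== SOURCE A (Python) =====
-- def numPosicionesContiguas(cadena1, cadena2, num1, num2):
--     if num2 < len(cadena2) and num1 < len(cadena1) and cadena1[num1] == cadena2[num2]:
--         resultado = 1 + numPosicionesContiguas(cadena1, cadena2, num1 + 1, num2 + 1)
--     else:
--         resultado = 0
--     return resultado
--
-- def crearTablaSecuencias(cadena1, cadena2):
--     tabla = []
--     for i in range(len(cadena1)):
--         fila = []
--         for j in range(len(cadena2)):
--             if i == 0: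
--                 if cadena1[i] == cadena2[j]:
--                     fila.append(1)
--                 else:
--                     fila.append(0)
--             else:
--                 if tabla[i - 1][j] >= 0:
--                     if j + tabla[i - 1][j] < len(tabla[i - 1]) and cadena1[i] == cadena2[j + tabla[i - 1][j]]:
--                         fila.append(tabla[i - 1][j] + 1)
--                     else:
--                         if abs(tabla[i - 1][j]) < numPosicionesContiguas(cadena1, cadena2, i, j):
--                             fila.append(1)
--                         else:
--                             fila.append(- tabla[i - 1][j])
--                 else:
--                     if abs(tabla[i - 1][j]) < numPosicionesContiguas(cadena1, cadena2, i, j):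
--                         fila.append(1)
--                     else:
--                         fila.append(tabla[i - 1][j])
--         tabla.append(fila)
--     aux = []
--     for i in range(len(tabla)):
--         fila = []
--         for j in range(len(tabla[i])):
--             fila.append(abs(tabla[i][j]))
--         aux.append(fila)
--     return aux
-- ===== SOURCE B (Python) =====
-- def crearTablaSecuencias(cadena1, cadena2):
--     # Same table as A, but the O(n)-recursion numPosicionesContiguas is replaced by an
--     # O(1) lookup in a precomputed longest-common-run table (backward DP), and the
--     # signed table is kept only one row at a time while the abs rows are emitted
--     # directly in the same pass (no second abs pass).
--     n, m = len(cadena1), len(cadena2)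
--     # runs[i][j] = length of the longest common contiguous run starting at (i, j);
--     # rows built backward, each row padded with a trailing 0 so that row[j + 1] is safe.
--     rows = []
--     nxt = [0] * (m + 1)
--     for ch in reversed(cadena1):
--         row = [v + 1 if ch == b else 0 for b, v in zip(cadena2, nxt[1:])] + [0]
--         rows.append(row)
--         nxt = row
--     rows.reverse()
--     out = []
--     if n > 0:
--         signed = [1 if cadena1[0] == b else 0 for b in cadena2]
--         out.append([abs(t) for t in signed])
--         for ch, runrow in zip(cadena1[1:], rows[1:]):
--             signed = [t + 1 if t >= 0 and j + t < m and ch == cadena2[j + t]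
--                       else (1 if abs(t) < r else -abs(t))
--                       for j, (t, r) in enumerate(zip(signed, runrow))]
--             out.append([abs(t) for t in signed])
--     return out
-- ===== Notes on version B (the rewrite author's own statement) =====
-- stated objective: faster
-- what changed: Replaces the O(n)-deep recursion numPosicionesContiguas (called per cell) by a precomputed longest-common-run table built with a backward O(1) DP, keeps only the previous signed row instead of the whole signed table, and emits the abs rows in the same pass instead of a second full abs pass.
import Mathlib
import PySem

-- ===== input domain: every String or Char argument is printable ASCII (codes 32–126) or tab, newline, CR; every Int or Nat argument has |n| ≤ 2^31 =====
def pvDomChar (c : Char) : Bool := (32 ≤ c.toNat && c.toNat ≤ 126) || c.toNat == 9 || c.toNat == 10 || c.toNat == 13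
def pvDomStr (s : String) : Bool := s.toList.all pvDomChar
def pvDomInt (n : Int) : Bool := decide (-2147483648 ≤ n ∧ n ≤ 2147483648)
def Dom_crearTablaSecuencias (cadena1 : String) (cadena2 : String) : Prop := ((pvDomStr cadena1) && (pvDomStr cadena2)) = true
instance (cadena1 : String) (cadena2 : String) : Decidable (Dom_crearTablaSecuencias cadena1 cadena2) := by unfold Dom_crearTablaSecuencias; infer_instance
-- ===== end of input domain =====

-- B replaces A's per-cell O(n) recursion by a precomputed longest-common-run table
-- (backward DP) and streams the abs rows in one pass: asymptotically faster, same value.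

-- ===== PORT A =====
-- helper numPosicionesContiguas: length of the common contiguous run starting at (num1, num2)
def pvNumPos (l1 l2 : List Char) (n1 n2 : Int) : Int :=
  if h : n2 < (l2.length : Int) ∧ n1 < (l1.length : Int) ∧
      (PySem.List.pyGetD l1 n1 ' ' == PySem.List.pyGetD l2 n2 ' ') = true then
    1 + pvNumPos l1 l2 (n1 + 1) (n2 + 1)
  else 0
termination_by ((l1.length : Int) - n1).toNat
decreasing_by
  obtain ⟨-, h2, -⟩ := h; omega

def crearTablaSecuencias (cadena1 : String) (cadena2 : String) : List (List Int) :=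
  let l1 := cadena1.toList
  let l2 := cadena2.toList
  let tabla := (PySem.List.pyRange 0 (l1.length : Int)).foldl (fun tabla i =>
    let fila := (PySem.List.pyRange 0 (l2.length : Int)).foldl (fun fila j =>
      if i == 0 then
        if PySem.List.pyGetD l1 i ' ' == PySem.List.pyGetD l2 j ' ' then fila ++ [(1 : Int)]
        else fila ++ [(0 : Int)]
      else
        let prev := PySem.List.pyGetD tabla (i - 1) []
        let t := PySem.List.pyGetD prev j 0
        if t ≥ 0 then
          if j + t < (prev.length : Int) ∧
              (PySem.List.pyGetD l1 i ' ' == PySem.List.pyGetD l2 (j + t) ' ') = true then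
            fila ++ [t + 1]
          else
            if |t| < pvNumPos l1 l2 i j then fila ++ [(1 : Int)] else fila ++ [-t]
        else
          if |t| < pvNumPos l1 l2 i j then fila ++ [(1 : Int)] else fila ++ [t]
      ) []
    tabla ++ [fila]) []
  (PySem.List.pyRange 0 (tabla.length : Int)).foldl (fun aux i =>
    let fi := PySem.List.pyGetD tabla i []
    aux ++ [(PySem.List.pyRange 0 (fi.length : Int)).foldl
      (fun fila j => fila ++ [|PySem.List.pyGetD fi j 0|]) []]) []

-- ===== PORT B =====
-- one backward-DP row: [v + 1 if ch == b else 0 for b, v in zip(cadena2, nxt[1:])] + [0]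
def pvRunRow (c : Char) (l2 : List Char) (nxt : List Int) : List Int :=
  ((l2.zip (nxt.drop 1)).map fun bv => if c == bv.1 then bv.2 + 1 else 0) ++ [0]

-- one forward step: the comprehension over enumerate(zip(signed, runrow))
def pvStep (l2 : List Char) (c : Char) (signed runrow : List Int) : List Int :=
  ((signed.zip runrow).zipIdx).map fun trj =>
    if 0 ≤ trj.1.1 ∧ (trj.2 : Int) + trj.1.1 < (l2.length : Int) ∧
        (c == PySem.List.pyGetD l2 ((trj.2 : Int) + trj.1.1) ' ') = true then trj.1.1 + 1
    else if |trj.1.1| < trj.1.2 then 1 else -|trj.1.1|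

def crearTablaSecuencias_alt (cadena1 : String) (cadena2 : String) : List (List Int) :=
  let l1 := cadena1.toList
  let l2 := cadena2.toList
  -- backward loop over reversed(cadena1) building the run rows, then rows.reverse()
  let rows := (l1.reverse.foldl (fun st ch =>
      let row := pvRunRow ch l2 st.2
      (st.1 ++ [row], row)) (([] : List (List Int)), List.replicate (l2.length + 1) (0 : Int))).1.reverse
  match l1 with
  | [] => []
  | c :: cs =>
    let signed0 : List Int := l2.map fun b => if c == b then (1 : Int) else 0
    ((cs.zip (rows.drop 1)).foldl (fun st p =>
        let ns := pvStep l2 p.1 st.2 p.2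
        (st.1 ++ [ns.map fun t => |t|], ns))
      ([signed0.map fun t => |t|], signed0)).1

-- ===== PRECONDITION & SPEC =====
def Spec_crearTablaSecuencias (cadena1 : String) (cadena2 : String) (out : List (List Int)) : Prop := out = crearTablaSecuencias_alt cadena1 cadena2
instance (cadena1 : String) (cadena2 : String) (out : List (List Int)) : Decidable (Spec_crearTablaSecuencias cadena1 cadena2 out) := by unfold Spec_crearTablaSecuencias; infer_instance

-- ===== CLAIM (what is proved, stated in full; the proofs are below) =====
def Claim_equal_crearTablaSecuencias : Prop := ∀ (cadena1 : String) (cadena2 : String), Dom_crearTablaSecuencias cadena1 cadena2 → Spec_crearTablaSecuencias cadena1 cadena2 (crearTablaSecuencias cadena1 cadena2)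

-- ===== LEMMAS AND PROOFS =====

-- reference: the plain run-length function
def pvR : List Char → List Char → Int
  | a :: as, b :: bs => if a == b then 1 + pvR as bs else 0
  | _, _ => 0

theorem pvR_nil_left (l2 : List Char) : pvR [] l2 = 0 := by cases l2 <;> rfl
theorem pvR_nil_right (l1 : List Char) : pvR l1 [] = 0 := by cases l1 <;> rfl

-- reference: the run rows as structural recursion (front-to-back)
def pvRunRows (l1 l2 : List Char) : List (List Int) :=
  match l1 with
  | [] => []
  | c :: cs =>
    let rest := pvRunRows cs l2
    pvRunRow c l2 (rest.headD (List.replicate (l2.length + 1) 0)) :: rest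

theorem pvR_cons (a b : Char) (as bs : List Char) :
    pvR (a :: as) (b :: bs) = if a == b then 1 + pvR as bs else 0 := rfl

theorem pvNumPos_eq (l1 l2 : List Char) : ∀ i j : Nat,
    pvNumPos l1 l2 (i : Int) (j : Int) = pvR (l1.drop i) (l2.drop j) := by
  have key : ∀ (f i j : Nat), l1.length - i ≤ f →
      pvNumPos l1 l2 (i : Int) (j : Int) = pvR (l1.drop i) (l2.drop j) := by
    intro f
    induction f with
    | zero =>
      intro i j h
      rw [pvNumPos, dif_neg (by rintro ⟨-, hb, -⟩; omega)]
      rw [List.drop_eq_nil_of_le (by omega), pvR_nil_left]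
    | succ f ih =>
      intro i j h
      by_cases hi : i < l1.length
      · by_cases hj : j < l2.length
        · have hg1 : PySem.List.pyGetD l1 (i : Int) ' ' = l1[i] := by
            rw [PySem.List.pyGetD_natCast, List.getD_eq_getElem _ _ hi]
          have hg2 : PySem.List.pyGetD l2 (j : Int) ' ' = l2[j] := by
            rw [PySem.List.pyGetD_natCast, List.getD_eq_getElem _ _ hj]
          rw [pvNumPos, List.drop_eq_getElem_cons hi, List.drop_eq_getElem_cons hj, pvR_cons]
          by_cases heq : l1[i] == l2[j]
          · rw [dif_pos ⟨by omega, by omega, by rw [hg1, hg2]; exact heq⟩, if_pos heq]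
            have : ((i : Int) + 1) = ((i + 1 : Nat) : Int) := by omega
            have h2 : ((j : Int) + 1) = ((j + 1 : Nat) : Int) := by omega
            rw [this, h2, ih (i + 1) (j + 1) (by omega)]
          · rw [dif_neg (by rintro ⟨-, -, hb⟩; rw [hg1, hg2] at hb; exact heq hb), if_neg heq]
        · rw [pvNumPos, dif_neg (by rintro ⟨hb, -, -⟩; omega)]
          rw [List.drop_eq_nil_of_le (as := l2) (by omega), pvR_nil_right]
      · rw [pvNumPos, dif_neg (by rintro ⟨-, hb, -⟩; omega)]
        rw [List.drop_eq_nil_of_le (by omega), pvR_nil_left]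
  intro i j
  exact key l1.length i j (by omega)

theorem pvRunRows_length (l1 l2 : List Char) : (pvRunRows l1 l2).length = l1.length := by
  induction l1 with
  | nil => rfl
  | cons c cs ih => simp [pvRunRows, ih]

theorem pvRunRows_head_spec (l2 : List Char) : ∀ l1 : List Char,
    ((pvRunRows l1 l2).headD (List.replicate (l2.length + 1) 0)).length = l2.length + 1 ∧
    ∀ j : Nat, j ≤ l2.length →
      ((pvRunRows l1 l2).headD (List.replicate (l2.length + 1) 0)).getD j 0 = pvR l1 (l2.drop j) := by
  intro l1
  induction l1 with
  | nil =>
    refine ⟨by simp [pvRunRows], fun j hj => ?_⟩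
    rw [pvR_nil_left]
    simp only [pvRunRows, List.headD_nil]
    exact List.getD_replicate _ (by omega)
  | cons c cs ih =>
    obtain ⟨ihlen, ihget⟩ := ih
    have hd : (pvRunRows (c :: cs) l2).headD (List.replicate (l2.length + 1) 0)
        = pvRunRow c l2 ((pvRunRows cs l2).headD (List.replicate (l2.length + 1) 0)) := by
      simp [pvRunRows]
    set nxt := (pvRunRows cs l2).headD (List.replicate (l2.length + 1) 0) with hnxt
    have hxlen : ((l2.zip (nxt.drop 1)).map fun bv =>
        if c == bv.1 then bv.2 + 1 else 0).length = l2.length := by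
      simp; omega
    constructor
    · rw [hd, pvRunRow]; simp; omega
    · intro j hj
      rw [hd, pvRunRow]
      rcases lt_or_eq_of_le hj with hlt | heq
      · rw [List.getD_append _ _ _ _ (by omega),
          List.getD_eq_getElem _ _ (by omega), List.getElem_map, List.getElem_zip]
        have hdrop : (nxt.drop 1)[j]'(by simp; omega) = nxt[1 + j]'(by omega) := List.getElem_drop
        rw [List.drop_eq_getElem_cons hlt, pvR_cons, hdrop]
        have : nxt[1 + j]'(by omega) = pvR cs (l2.drop (j + 1)) := by
          rw [← List.getD_eq_getElem nxt 0 (by omega), Nat.add_comm 1 j]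
          exact ihget (j + 1) (by omega)
        rw [this]
        split <;> simp [Int.add_comm]
      · subst heq
        rw [List.drop_length, pvR_nil_right,
          List.getD_eq_getElem _ _ (by rw [List.length_append, hxlen]; simp),
          List.getElem_append_right (by omega)]
        simp

theorem pvRunRows_drop (l2 : List Char) : ∀ (k : Nat) (l1 : List Char),
    (pvRunRows l1 l2).drop k = pvRunRows (l1.drop k) l2 := by
  intro k
  induction k with
  | zero => intro l1; simp
  | succ k ih =>
    intro l1
    cases l1 with
    | nil => simp [pvRunRows]
    | cons c cs =>
      show (pvRunRows (c :: cs) l2).drop (k + 1) = _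
      rw [pvRunRows]
      simpa using ih cs

-- the reversed-loop fold in port B computes pvRunRows
theorem pvRows_fold_eq (l2 : List Char) : ∀ l1 : List Char,
    (l1.reverse.foldl (fun st ch =>
      let row := pvRunRow ch l2 st.2
      (st.1 ++ [row], row)) (([] : List (List Int)), List.replicate (l2.length + 1) (0 : Int)))
    = ((pvRunRows l1 l2).reverse,
       (pvRunRows l1 l2).headD (List.replicate (l2.length + 1) 0)) := by
  intro l1
  induction l1 with
  | nil => simp [pvRunRows]
  | cons c cs ih =>
    rw [List.reverse_cons, List.foldl_append, ih]
    simp [pvRunRows]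

theorem pvStep_length (l2 : List Char) (c : Char) (signed runrow : List Int)
    (h : signed.length ≤ runrow.length) :
    (pvStep l2 c signed runrow).length = signed.length := by
  simp [pvStep]; omega

theorem pvRunRows_mem_length (l2 : List Char) : ∀ l1 : List Char,
    ∀ row ∈ pvRunRows l1 l2, row.length = l2.length + 1 := by
  intro l1
  induction l1 with
  | nil => intro row h; simp [pvRunRows] at h
  | cons c cs ih =>
    intro row h
    rw [pvRunRows] at h
    rcases List.mem_cons.mp h with h | h
    · have := (pvRunRows_head_spec l2 (c :: cs)).1
      simp only [pvRunRows, List.headD_cons] at this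
      rw [h]; exact this
    · exact ih row h

theorem pv_scanl_snoc {α β : Type} (f : β → α → β) :
    ∀ (l : List α) (b : β) (x : α),
      List.scanl f b (l ++ [x]) = List.scanl f b l ++ [f (l.foldl f b) x] := by
  intro l
  induction l with
  | nil => intro b x; simp
  | cons a l ih => intro b x; simp [List.scanl_cons, ih]

theorem pv_scanl_getD_last {α β : Type} (f : β → α → β) :
    ∀ (l : List α) (b : β) (d : β),
      (List.scanl f b l).getD l.length d = l.foldl f b := by
  intro l
  induction l with
  | nil => intro b d; simp
  | cons a l ih => intro b d; simp only [List.scanl_cons, List.length_cons]; exact ih (f b a) d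

theorem pv_scanl_eq_cons {α β : Type} (f : β → α → β) (l : List α) (b : β) :
    List.scanl f b l = b :: (List.scanl f b l).tail := by
  cases l <;> simp

theorem pv_foldl_step_length (l2 : List Char) :
    ∀ (ps : List (Char × List Int)) (s : List Int),
      (∀ p ∈ ps, p.2.length = l2.length + 1) → s.length = l2.length →
      (ps.foldl (fun s p => pvStep l2 p.1 s p.2) s).length = l2.length := by
  intro ps
  induction ps with
  | nil => intro s _ hs; exact hs
  | cons p ps ih =>
    intro s hp hs
    simp only [List.foldl_cons]
    refine ih _ (fun q hq => hp q (List.mem_cons_of_mem _ hq)) ?_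
    rw [pvStep_length l2 p.1 s p.2 (by rw [hs, hp p (List.mem_cons_self)]; omega), hs]

theorem pv_map_range_getD {α β : Type} (l : List α) (g : α → β) (d : α) :
    (List.range l.length).map (fun j => g (PySem.List.pyGetD l ((j : Nat) : Int) d)) = l.map g := by
  apply List.ext_getElem
  · simp
  · intro n h1 h2
    simp only [List.getElem_map, List.getElem_range]
    rw [PySem.List.pyGetD_natCast, List.getD_eq_getElem _ _ (by simpa using h2)]

-- A's per-cell value as a function of (tabla, i, j)
def pvGA (l1 l2 : List Char) (tabla : List (List Int)) (i j : Int) : Int :=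
  if i == 0 then
    (if PySem.List.pyGetD l1 i ' ' == PySem.List.pyGetD l2 j ' ' then 1 else 0)
  else
    let prev := PySem.List.pyGetD tabla (i - 1) []
    let t := PySem.List.pyGetD prev j 0
    if t ≥ 0 then
      if j + t < (prev.length : Int) ∧
          (PySem.List.pyGetD l1 i ' ' == PySem.List.pyGetD l2 (j + t) ' ') = true then t + 1
      else if |t| < pvNumPos l1 l2 i j then 1 else -t
    else if |t| < pvNumPos l1 l2 i j then 1 else t

theorem pv_innerA (l1 l2 : List Char) (tabla : List (List Int)) (i : Int) :
    (PySem.List.pyRange 0 (l2.length : Int)).foldl (fun fila j =>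
      if i == 0 then
        if PySem.List.pyGetD l1 i ' ' == PySem.List.pyGetD l2 j ' ' then fila ++ [(1 : Int)]
        else fila ++ [(0 : Int)]
      else
        let prev := PySem.List.pyGetD tabla (i - 1) []
        let t := PySem.List.pyGetD prev j 0
        if t ≥ 0 then
          if j + t < (prev.length : Int) ∧
              (PySem.List.pyGetD l1 i ' ' == PySem.List.pyGetD l2 (j + t) ' ') = true then
            fila ++ [t + 1]
          else
            if |t| < pvNumPos l1 l2 i j then fila ++ [(1 : Int)] else fila ++ [-t]
        else
          if |t| < pvNumPos l1 l2 i j then fila ++ [(1 : Int)] else fila ++ [t]) []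
    = (List.range l2.length).map (fun j => pvGA l1 l2 tabla i ((j : Nat) : Int)) := by
  have hbody : ∀ (fila : List Int) (j : Int),
      (if i == 0 then
        if PySem.List.pyGetD l1 i ' ' == PySem.List.pyGetD l2 j ' ' then fila ++ [(1 : Int)]
        else fila ++ [(0 : Int)]
      else
        let prev := PySem.List.pyGetD tabla (i - 1) []
        let t := PySem.List.pyGetD prev j 0
        if t ≥ 0 then
          if j + t < (prev.length : Int) ∧
              (PySem.List.pyGetD l1 i ' ' == PySem.List.pyGetD l2 (j + t) ' ') = true then
            fila ++ [t + 1]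
          else
            if |t| < pvNumPos l1 l2 i j then fila ++ [(1 : Int)] else fila ++ [-t]
        else
          if |t| < pvNumPos l1 l2 i j then fila ++ [(1 : Int)] else fila ++ [t])
      = fila ++ [pvGA l1 l2 tabla i j] := by
    intro fila j
    simp only [pvGA]
    split_ifs <;> rfl
  rw [PySem.List.pyRange_zero_natCast, List.foldl_map]
  simp only [hbody]
  simpa using PySem.List.foldl_append_singleton_eq_map
    (fun k : Nat => pvGA l1 l2 tabla i ((k : Nat) : Int)) (List.range l2.length) []

theorem pv_rowA_eq_step (l1 l2 : List Char) (tabla : List (List Int)) (k : Nat)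
    (hk1 : 1 ≤ k) (hk : k < l1.length)
    (prev : List Int) (hprev : PySem.List.pyGetD tabla ((k : Int) - 1) [] = prev)
    (hplen : prev.length = l2.length) :
    (List.range l2.length).map (fun j => pvGA l1 l2 tabla (k : Int) ((j : Nat) : Int))
    = pvStep l2 (l1[k]'hk) prev
        ((pvRunRows (l1.drop k) l2).headD (List.replicate (l2.length + 1) 0)) := by
  obtain ⟨hrlen, hrget⟩ := pvRunRows_head_spec l2 (l1.drop k)
  set runrow := (pvRunRows (l1.drop k) l2).headD (List.replicate (l2.length + 1) 0) with hrr
  apply List.ext_getElem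
  · simp [pvStep, hplen, hrlen]
  · intro n h1 h2
    have hn : n < l2.length := by simpa using h1
    simp only [List.getElem_map, List.getElem_range, pvStep, List.getElem_zipIdx,
      List.getElem_zip, Nat.zero_add]
    have hk0 : ((k : Int) == 0) = false := by simp; omega
    have ht : PySem.List.pyGetD prev ((n : Nat) : Int) 0 = prev.getD n 0 :=
      PySem.List.pyGetD_natCast prev n 0
    have hge : ∀ (h : n < prev.length), prev[n]'h = prev.getD n 0 := fun h =>
      (List.getD_eq_getElem prev 0 h).symm
    have hgr : ∀ (h : n < runrow.length), runrow[n]'h = pvR (l1.drop k) (l2.drop n) :=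
      fun h => by rw [← List.getD_eq_getElem runrow 0 h]; exact hrget n (by omega)
    have hlc : PySem.List.pyGetD l1 ((k : Nat) : Int) ' ' = l1[k]'hk := by
      rw [PySem.List.pyGetD_natCast, List.getD_eq_getElem _ _ hk]
    have hnp : pvNumPos l1 l2 (k : Int) (n : Int) = pvR (l1.drop k) (l2.drop n) :=
      pvNumPos_eq l1 l2 k n
    simp only [pvGA, hk0, Bool.false_eq_true, if_false, hprev, ht, hge, hgr, hlc, hnp, hplen]
    set t := prev.getD n 0 with hts
    set r := pvR (l1.drop k) (l2.drop n) with hrs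
    rcases le_or_gt 0 t with hpos | hneg
    · rw [if_pos hpos]
      by_cases hcond : ((n : Nat) : Int) + t < (l2.length : Int) ∧
          ((l1[k]'hk) == PySem.List.pyGetD l2 (((n : Nat) : Int) + t) ' ') = true
      · rw [if_pos hcond, if_pos ⟨hpos, hcond.1, hcond.2⟩]
      · rw [if_neg hcond, if_neg (c := 0 ≤ t ∧ ((n : Nat) : Int) + t < (l2.length : Int) ∧ ((l1[k]'hk) == PySem.List.pyGetD l2 (((n : Nat) : Int) + t) ' ') = true) (fun hcon => hcond ⟨hcon.2.1, hcon.2.2⟩)]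
        by_cases habs : |t| < r
        · rw [if_pos habs, if_pos habs]
        · rw [if_neg habs, if_neg habs, abs_of_nonneg hpos]
    · rw [if_neg (by omega), if_neg (c := 0 ≤ t ∧ ((n : Nat) : Int) + t < (l2.length : Int) ∧ ((l1[k]'hk) == PySem.List.pyGetD l2 (((n : Nat) : Int) + t) ' ') = true) (fun hcon => absurd hcon.1 (by omega))]
      by_cases habs : |t| < r
      · rw [if_pos habs, if_pos habs]
      · rw [if_neg habs, if_neg habs, abs_of_neg hneg, neg_neg]

theorem pv_headD_getElem {α : Type} (l : List α) (d : α) (h : 0 < l.length) :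
    l.headD d = l[0]'h := by
  cases l with
  | nil => simp at h
  | cons a t => rfl

theorem pv_foldOuter (l2 : List Char) (c : Char) (cs : List Char) :
    (PySem.List.pyRange 0 (((c :: cs).length : Nat) : Int)).foldl
      (fun tabla i => tabla ++
        [(List.range l2.length).map (fun j => pvGA (c :: cs) l2 tabla i ((j : Nat) : Int))]) []
    = List.scanl (fun s p => pvStep l2 p.1 s p.2)
        (l2.map fun b => if c == b then (1 : Int) else 0)
        (cs.zip ((pvRunRows (c :: cs) l2).drop 1)) := by
  have hrow0 : (List.range l2.length).map
      (fun j => pvGA (c :: cs) l2 [] (((0 : Nat)) : Int) ((j : Nat) : Int))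
      = l2.map (fun b => if c == b then (1 : Int) else 0) := by
    rw [← pv_map_range_getD l2 (fun b => if c == b then (1 : Int) else 0) ' ']
    apply List.map_congr_left
    intro j _
    simp only [pvGA]
    rw [if_pos (by decide)]
    have hc0 : PySem.List.pyGetD (c :: cs) (((0 : Nat)) : Int) ' ' = c := by
      rw [PySem.List.pyGetD_natCast]; rfl
    rw [hc0]
  set step : List Int → Char × List Int → List Int := fun s p => pvStep l2 p.1 s p.2 with hstep
  set signed0 := l2.map fun b => if c == b then (1 : Int) else 0 with hs0
  set rows := pvRunRows (c :: cs) l2 with hrows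
  set pairs := cs.zip (rows.drop 1) with hpairs
  have hrowslen : rows.length = cs.length + 1 := by
    rw [hrows, pvRunRows_length]; rfl
  have hpairslen : pairs.length = cs.length := by
    rw [hpairs]; simp [hrowslen]
  have hfold : ∀ k : Nat, k ≤ cs.length →
      (PySem.List.pyRange 0 (((k + 1 : Nat)) : Int)).foldl
        (fun tabla i => tabla ++
          [(List.range l2.length).map (fun j => pvGA (c :: cs) l2 tabla i ((j : Nat) : Int))]) []
      = List.scanl step signed0 (pairs.take k) := by
    intro k
    induction k with
    | zero =>
      intro _
      have h01 : (((0 + 1 : Nat)) : Int) = (0 : Int) + 1 := by omega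
      rw [h01, PySem.List.pyRange_one_succ_right (by omega),
        show PySem.List.pyRange 0 0 = [] from by decide]
      simp only [List.nil_append, List.foldl_cons, List.foldl_nil, List.take_zero,
        List.scanl_nil]
      rw [show (0 : Int) = (((0 : Nat)) : Int) from by omega, hrow0]
    | succ k ih =>
      intro hk
      have hsucc : (((k + 1 + 1 : Nat)) : Int) = (((k + 1 : Nat)) : Int) + 1 := by
        push_cast; ring
      rw [hsucc, PySem.List.pyRange_one_succ_right (by positivity), List.foldl_append,
        ih (by omega)]
      simp only [List.foldl_cons, List.foldl_nil]
      set tabla := List.scanl step signed0 (pairs.take k) with htab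
      have htakelen : (pairs.take k).length = k := by
        rw [List.length_take]; omega
      have htlen : tabla.length = k + 1 := by
        rw [htab, List.length_scanl, htakelen]
      set prev := (pairs.take k).foldl step signed0 with hprevdef
      have hprev : PySem.List.pyGetD tabla (((k + 1 : Nat) : Int) - 1) [] = prev := by
        have hc : (((k + 1 : Nat) : Int) - 1) = ((k : Nat) : Int) := by omega
        rw [hc, PySem.List.pyGetD_natCast]
        have hlast := pv_scanl_getD_last step (pairs.take k) signed0 []
        rw [htakelen] at hlast
        exact hlast
      have hplen : prev.length = l2.length := by
        refine pv_foldl_step_length l2 (pairs.take k) signed0 ?_ (by simp [hs0])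
        intro p hp
        have hp2 : p.2 ∈ rows.drop 1 :=
          (List.of_mem_zip (List.mem_of_mem_take hp)).2
        exact pvRunRows_mem_length l2 (c :: cs) p.2 (List.mem_of_mem_drop hp2)
      have hrow := pv_rowA_eq_step (c :: cs) l2 tabla (k + 1) (by omega)
        (by simp; omega) prev hprev hplen
      rw [hrow]
      have hkp : k < pairs.length := by omega
      have htake : pairs.take (k + 1) = pairs.take k ++ [pairs[k]'hkp] := by
        rw [List.take_add_one, List.getElem?_eq_getElem hkp]
        rfl
      rw [htake, pv_scanl_snoc, ← htab, ← hprevdef]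
      congr 1
      have hkcs : k < cs.length := by omega
      have hkr : k < (rows.drop 1).length := by simp [hrowslen]; omega
      have hpk : pairs[k]'hkp = (cs[k]'hkcs, (rows.drop 1)[k]'hkr) :=
        List.getElem_zip
      have hcs : cs[k]'hkcs = (c :: cs)[k + 1]'(by simp; omega) := by
        simp
      have hdropne : 0 < (rows.drop (k + 1)).length := by
        simp [hrowslen]; omega
      have hr2 : (rows.drop 1)[k]'hkr = (rows.drop (k + 1))[0]'hdropne := by
        rw [List.getElem_drop, List.getElem_drop]
        congr 1; omega
      have hr3 : (rows.drop (k + 1))[0]'hdropne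
          = (pvRunRows ((c :: cs).drop (k + 1)) l2).headD (List.replicate (l2.length + 1) 0) := by
        rw [← pvRunRows_drop l2 (k + 1) (c :: cs)] at *
        exact (pv_headD_getElem _ _ hdropne).symm
      simp only [hstep, hpk, hcs, hr2, hr3]
  have hlen : ((c :: cs).length : Nat) = cs.length + 1 := rfl
  rw [hlen]
  have := hfold cs.length (le_refl _)
  rw [List.take_of_length_le (by omega)] at this
  exact this

theorem pv_foldB (l2 : List Char) :
    ∀ (ps : List (Char × List Int)) (out : List (List Int)) (signed : List Int),
      (ps.foldl (fun st p =>
        (st.1 ++ [(pvStep l2 p.1 st.2 p.2).map fun t => |t|], pvStep l2 p.1 st.2 p.2))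
        (out, signed)).1
      = out ++ ((List.scanl (fun s p => pvStep l2 p.1 s p.2) signed ps).tail).map
          (List.map fun t => |t|) := by
  intro ps
  induction ps with
  | nil => intro out signed; simp
  | cons p ps ih =>
    intro out signed
    simp only [List.foldl_cons, List.scanl_cons, List.tail_cons]
    rw [ih]
    rw [pv_scanl_eq_cons (fun s p => pvStep l2 p.1 s p.2) ps (pvStep l2 p.1 signed p.2)]
    simp

theorem pv_absPass (tabla : List (List Int)) :
    (PySem.List.pyRange 0 (tabla.length : Int)).foldl (fun aux i =>
      let fi := PySem.List.pyGetD tabla i []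
      aux ++ [(PySem.List.pyRange 0 (fi.length : Int)).foldl
        (fun fila j => fila ++ [|PySem.List.pyGetD fi j 0|]) []]) []
    = tabla.map (List.map fun t => |t|) := by
  have hinner : ∀ fi : List Int,
      (PySem.List.pyRange 0 (fi.length : Int)).foldl
        (fun fila j => fila ++ [|PySem.List.pyGetD fi j 0|]) [] = fi.map (fun t => |t|) := by
    intro fi
    rw [PySem.List.pyRange_zero_natCast, List.foldl_map]
    rw [PySem.List.foldl_append_singleton_eq_map
      (fun k : Nat => |PySem.List.pyGetD fi ((k : Nat) : Int) 0|) (List.range fi.length) []]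
    simpa using pv_map_range_getD fi (fun t => |t|) 0
  simp only [hinner]
  rw [PySem.List.pyRange_zero_natCast, List.foldl_map]
  rw [PySem.List.foldl_append_singleton_eq_map
    (fun k : Nat => (PySem.List.pyGetD tabla ((k : Nat) : Int) []).map (fun t => |t|))
    (List.range tabla.length) []]
  simpa using pv_map_range_getD tabla (fun fi => fi.map (fun t => |t|)) []

-- ===== VERDICT (by name: the statement is the Claim_ definition above) =====
theorem crearTablaSecuencias_spec : Claim_equal_crearTablaSecuencias := by
  intro cadena1 cadena2 _
  unfold Spec_crearTablaSecuencias
  simp only [crearTablaSecuencias, crearTablaSecuencias_alt]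
  rcases hl : cadena1.toList with _ | ⟨c, cs⟩
  · simp
  · rw [pv_absPass]
    have hfun : (fun (tabla : List (List Int)) (i : Int) =>
        tabla ++ [(PySem.List.pyRange 0 (cadena2.toList.length : Int)).foldl (fun fila j =>
          if i == 0 then
            if PySem.List.pyGetD (c :: cs) i ' ' == PySem.List.pyGetD cadena2.toList j ' ' then
              fila ++ [(1 : Int)]
            else fila ++ [(0 : Int)]
          else
            let prev := PySem.List.pyGetD tabla (i - 1) []
            let t := PySem.List.pyGetD prev j 0
            if t ≥ 0 then
              if j + t < (prev.length : Int) ∧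
                  (PySem.List.pyGetD (c :: cs) i ' ' ==
                    PySem.List.pyGetD cadena2.toList (j + t) ' ') = true then
                fila ++ [t + 1]
              else
                if |t| < pvNumPos (c :: cs) cadena2.toList i j then fila ++ [(1 : Int)]
                else fila ++ [-t]
            else
              if |t| < pvNumPos (c :: cs) cadena2.toList i j then fila ++ [(1 : Int)]
              else fila ++ [t]) []])
        = fun (tabla : List (List Int)) (i : Int) => tabla ++
            [(List.range cadena2.toList.length).map
              (fun j => pvGA (c :: cs) cadena2.toList tabla i ((j : Nat) : Int))] := by
      funext tabla i
      rw [pv_innerA]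
    rw [hfun, pv_foldOuter]
    rw [pvRows_fold_eq]
    simp only [List.reverse_reverse]
    rw [pv_foldB]
    rw [pv_scanl_eq_cons (fun s p => pvStep cadena2.toList p.1 s p.2)
      (cs.zip ((pvRunRows (c :: cs) cadena2.toList).drop 1))
      (cadena2.toList.map fun b => if c == b then (1 : Int) else 0)]
    simp
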